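-- pv_equiv track=rewrite | github.com/psarmento/ANIPAR | ChiSqCalc.py | Logg_finder
-- ===== SOURCE A (Python) =====
-- def Logg_finder(star):
--     under_counter = 0
--     point_counter = 0
--     t = ''
--     for c in star:
--         if c == '_':
--             under_counter += 1
--         elif under_counter == 4 and point_counter<3:
--             if c == '.':
--                 point_counter += 1
--             if point_counter < 2:
--                 t += c
--     return t
-- ===== SOURCE B (Python) =====
-- def Logg_finder(star):
--     parts = star.split('_')
--     if len(parts) <= 4:
--         return ''
--     field = parts[4]
--     return '.'.join(field.split('.')[:2])
-- ===== Notes on version B (the rewrite author's own statement) =====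
-- stated objective: faster
-- what changed: Replaced the per-character counting loop by two split passes: take the fifth underscore-separated field and rejoin the first two of its dot-separated pieces.
import Mathlib
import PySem

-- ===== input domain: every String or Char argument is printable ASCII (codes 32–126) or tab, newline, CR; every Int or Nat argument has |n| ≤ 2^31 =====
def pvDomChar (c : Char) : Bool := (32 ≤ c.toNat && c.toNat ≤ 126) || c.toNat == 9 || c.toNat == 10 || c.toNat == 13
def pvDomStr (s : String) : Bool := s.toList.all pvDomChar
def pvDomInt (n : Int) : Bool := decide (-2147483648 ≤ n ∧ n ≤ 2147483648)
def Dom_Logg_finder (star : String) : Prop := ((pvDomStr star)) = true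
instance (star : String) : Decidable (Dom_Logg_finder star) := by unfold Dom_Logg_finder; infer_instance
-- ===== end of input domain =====

-- B replaces A's per-character counting loop by two split passes (fifth underscore-separated field, first two dot-separated pieces rejoined); measurably faster via the C-level split.

-- ===== PORT A =====
-- loop body of A (state: under_counter, point_counter, t as a char list)
def loggStep (s : Int × Int × List Char) (c : Char) : Int × Int × List Char :=
  if c = '_' then (s.1 + 1, s.2.1, s.2.2)
  else if s.1 = 4 ∧ s.2.1 < 3 then
    let p' := if c = '.' then s.2.1 + 1 else s.2.1
    (s.1, p', if p' < 2 then s.2.2 ++ [c] else s.2.2)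
  else s

def Logg_finder (star : String) : String :=
  String.ofList (star.toList.foldl loggStep (0, 0, [])).2.2

-- ===== PORT B =====
def Logg_finder_alt (star : String) : String :=
  let parts := PySem.Chars.splitOn star.toList ['_']
  if parts.length ≤ 4 then ""
  else
    let field := (PySem.List.pyGet? parts 4).getD []
    String.ofList (PySem.Chars.join ['.'] (PySem.List.slice (PySem.Chars.splitOn field ['.']) none (some 2)))

-- ===== PRECONDITION & SPEC =====
def Spec_Logg_finder (star : String) (out : String) : Prop := out = Logg_finder_alt star
instance (star : String) (out : String) : Decidable (Spec_Logg_finder star out) := by unfold Spec_Logg_finder; infer_instance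

-- ===== CLAIM (what is proved, stated in full; the proofs are below) =====
def Claim_equal_Logg_finder : Prop := ∀ (star : String), Dom_Logg_finder star → Spec_Logg_finder star (Logg_finder star)

-- ===== LEMMAS AND PROOFS =====

-- clean structural recursion equal to single-char splitOn
def spChar (s : Char) : List Char → List (List Char)
  | [] => [[]]
  | c :: rest =>
    if c = s then [] :: spChar s rest
    else (c :: (spChar s rest).headI) :: (spChar s rest).tail

-- chars A appends from state (under_counter = u, point_counter = p)
def gSpec : Int → Int → List Char → List Char
  | _, _, [] => []
  | u, p, c :: rest =>
    if c = '_' then gSpec (u+1) p rest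
    else if u = 4 ∧ p < 3 then
      (if (if c = '.' then p+1 else p) < 2 then [c] else []) ++
        gSpec u (if c = '.' then p+1 else p) rest
    else gSpec u p rest

-- chars A appends inside the 5th field, from point state p
def hSpec : Int → List Char → List Char
  | _, [] => []
  | p, c :: rest =>
    if p < 3 then
      (if (if c = '.' then p+1 else p) < 2 then [c] else []) ++
        hSpec (if c = '.' then p+1 else p) rest
    else []

theorem getD_zero_headI (l : List (List Char)) : l.getD 0 [] = l.headI := by
  cases l <;> rfl

theorem spChar_cons_eq (s : Char) (l : List Char) :
    spChar s l = (spChar s l).headI :: (spChar s l).tail := by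
  cases l with
  | nil => rfl
  | cons c r =>
    simp only [spChar]
    split <;> rfl

theorem go_eq (s : Char) : ∀ (fuel : Nat) (l cur : List Char) (acc : List (List Char)),
    l.length < fuel →
    PySem.Chars.splitOn.go [s] fuel l cur acc =
      acc.reverse ++ (cur.reverse ++ (spChar s l).headI) :: (spChar s l).tail := by
  intro fuel
  induction fuel with
  | zero => intro l cur acc h; omega
  | succ n ih =>
    intro l cur acc h
    cases l with
    | nil => simp [PySem.Chars.splitOn.go, spChar]
    | cons c rest =>
      simp only [PySem.Chars.splitOn.go]
      by_cases hc : c = s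
      · subst hc
        have hp : List.isPrefixOf [c] (c :: rest) = true := by
          simp [List.isPrefixOf]
        simp only [hp, if_pos]
        rw [ih (List.drop [c].length (c :: rest)) [] (cur.reverse :: acc) (by simp at h ⊢; omega)]
        simp [spChar, ← spChar_cons_eq]
      · have hp : List.isPrefixOf [s] (c :: rest) = false := by
          simp [List.isPrefixOf]
          exact fun hh => hc hh.symm
        simp only [hp, Bool.false_eq_true, if_false]
        rw [ih rest (c :: cur) acc (by simp at h ⊢; omega)]
        simp [spChar, hc]

theorem splitOn_single (s : Char) (l : List Char) :
    PySem.Chars.splitOn l [s] = spChar s l := by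
  unfold PySem.Chars.splitOn
  rw [go_eq s (l.length + 1) l [] [] (by omega)]
  simp [← spChar_cons_eq]

theorem g_high : ∀ (l : List Char) (u p : Int), 5 ≤ u → gSpec u p l = [] := by
  intro l
  induction l with
  | nil => intro u p _; rfl
  | cons c rest ih =>
    intro u p hu
    have h4 : ¬ (u = 4 ∧ p < 3) := by omega
    by_cases hc : c = '_'
    · simp [gSpec, hc, ih (u+1) p (by omega)]
    · simp [gSpec, hc, h4, ih u p hu]

theorem h_ge3 : ∀ (l : List Char) (p : Int), 3 ≤ p → hSpec p l = [] := by
  intro l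
  cases l with
  | nil => intro p _; rfl
  | cons c rest =>
    intro p hp
    have : ¬ p < 3 := by omega
    simp [hSpec, this]

theorem g_eq_h : ∀ (l : List Char) (u p : Int), u ≤ 4 →
    gSpec u p l = hSpec p ((spChar '_' l).getD (4 - u).toNat []) := by
  intro l
  induction l with
  | nil =>
    intro u p _
    cases h : (4 - u).toNat <;> simp [gSpec, spChar, hSpec]
  | cons c rest ih =>
    intro u p hu
    by_cases hc : c = '_'
    · subst hc
      by_cases h4 : u = 4
      · subst h4
        rw [show gSpec 4 p ('_' :: rest) = gSpec 5 p rest from by simp [gSpec]]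
        rw [g_high rest 5 p (by omega)]
        rw [show spChar '_' ('_' :: rest) = [] :: spChar '_' rest from by simp [spChar]]
        simp [hSpec]
      · rw [show gSpec u p ('_' :: rest) = gSpec (u+1) p rest from by simp [gSpec]]
        rw [ih (u+1) p (by omega)]
        rw [show spChar '_' ('_' :: rest) = [] :: spChar '_' rest from by simp [spChar]]
        have h1 : (4 - u).toNat = (4 - (u+1)).toNat + 1 := by omega
        rw [h1]
        simp
    · have hsp : spChar '_' (c :: rest) =
          (c :: (spChar '_' rest).headI) :: (spChar '_' rest).tail := by
        simp [spChar, hc]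
      by_cases h4 : u = 4
      · subst h4
        by_cases hp : p < 3
        · rw [show gSpec 4 p (c :: rest) =
              (if (if c = '.' then p+1 else p) < 2 then [c] else []) ++
                gSpec 4 (if c = '.' then p+1 else p) rest from by
            simp [gSpec, hc, hp]]
          rw [ih 4 (if c = '.' then p+1 else p) (by omega)]
          rw [hsp]
          simp only [show ((4:Int) - 4).toNat = 0 from by omega, List.getD_cons_zero,
            getD_zero_headI]
          simp [hSpec, hp]
        · rw [show gSpec 4 p (c :: rest) = gSpec 4 p rest from by
            simp [gSpec, hc, hp]]
          rw [ih 4 p (by omega), hsp]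
          rw [h_ge3 _ p (by omega), h_ge3 _ p (by omega)]
      · have hnp : ¬ (u = 4 ∧ p < 3) := by simp [h4]
        rw [show gSpec u p (c :: rest) = gSpec u p rest from by simp [gSpec, hc, hnp]]
        rw [ih u p hu, hsp]
        have h1 : (4 - u).toNat = (3 - u).toNat + 1 := by omega
        rw [h1]
        conv_lhs => rw [spChar_cons_eq '_' rest]
        simp

theorem h_two : ∀ (l : List Char), hSpec 2 l = [] := by
  intro l
  induction l with
  | nil => rfl
  | cons c rest ih =>
    by_cases hc : c = '.'
    · simp [hSpec, hc, h_ge3 rest 3 (by omega)]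
    · simp [hSpec, hc, ih]

theorem h_one : ∀ (l : List Char), hSpec 1 l = List.takeWhile (· ≠ '.') l := by
  intro l
  induction l with
  | nil => rfl
  | cons c rest ih =>
    by_cases hc : c = '.'
    · simp [hSpec, hc, h_two, List.takeWhile]
    · simp [hSpec, hc, ih, List.takeWhile]

theorem headI_spChar (s : Char) : ∀ (l : List Char),
    (spChar s l).headI = List.takeWhile (· ≠ s) l := by
  intro l
  induction l with
  | nil => rfl
  | cons c rest ih =>
    by_cases hc : c = s
    · simp [spChar, hc, List.takeWhile]
    · simp [spChar, hc, ih, List.takeWhile]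

theorem join_one (a : List Char) : PySem.Chars.join ['.'] [a] = a := by
  simp [PySem.Chars.join, List.intercalate]

theorem join_two (a b : List Char) :
    PySem.Chars.join ['.'] [a, b] = a ++ '.' :: b := by
  simp [PySem.Chars.join, List.intercalate]

theorem h_zero_join : ∀ (l : List Char),
    hSpec 0 l = PySem.Chars.join ['.'] ((spChar '.' l).take 2) := by
  intro l
  induction l with
  | nil => simp [hSpec, spChar, PySem.Chars.join, List.intercalate]
  | cons c rest ih =>
    by_cases hc : c = '.'
    · subst hc
      rw [show hSpec 0 ('.' :: rest) = '.' :: hSpec 1 rest from by norm_num [hSpec]]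
      rw [show spChar '.' ('.' :: rest) = [] :: spChar '.' rest from by simp [spChar]]
      rw [spChar_cons_eq '.' rest]
      simp only [List.take_succ_cons, List.take_zero]
      rw [join_two]
      simp [h_one, headI_spChar]
    · rw [show hSpec 0 (c :: rest) = c :: hSpec 0 rest from by norm_num [hSpec, hc]]
      rw [show spChar '.' (c :: rest) =
          (c :: (spChar '.' rest).headI) :: (spChar '.' rest).tail from by simp [spChar, hc]]
      rw [spChar_cons_eq '.' rest] at ih
      cases ht : (spChar '.' rest).tail with
      | nil =>
        rw [ht] at ih
        simp only [List.take_succ_cons, List.take_nil, join_one] at ih ⊢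
        simp [ih]
      | cons x xs =>
        rw [ht] at ih
        simp only [List.take_succ_cons, List.take_zero, join_two] at ih ⊢
        simp [ih]

theorem foldA : ∀ (l : List Char) (u p : Int) (t : List Char),
    (List.foldl loggStep (u, p, t) l).2.2 = t ++ gSpec u p l := by
  intro l
  induction l with
  | nil => intro u p t; simp [gSpec]
  | cons c rest ih =>
    intro u p t
    rw [List.foldl_cons]
    by_cases hc : c = '_'
    · rw [show loggStep (u, p, t) c = (u + 1, p, t) from by simp [loggStep, hc]]
      rw [ih (u+1) p t]
      simp [gSpec, hc]
    · by_cases h4 : u = 4 ∧ p < 3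
      · rw [show loggStep (u, p, t) c =
            (u, if c = '.' then p+1 else p,
              if (if c = '.' then p+1 else p) < 2 then t ++ [c] else t) from by
          simp [loggStep, hc, h4]]
        by_cases hlt : (if c = '.' then p+1 else p) < 2
        · rw [if_pos hlt, ih u (if c = '.' then p+1 else p) (t ++ [c])]
          simp [gSpec, hc, h4, hlt]
        · rw [if_neg hlt, ih u (if c = '.' then p+1 else p) t]
          simp [gSpec, hc, h4, hlt]
      · rw [show loggStep (u, p, t) c = (u, p, t) from by simp [loggStep, hc, h4]]
        rw [ih u p t]
        simp [gSpec, hc, h4]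

-- ===== VERDICT (by name: the statement is the Claim_ definition above) =====
theorem Logg_finder_spec : Claim_equal_Logg_finder := by
  intro star _
  unfold Spec_Logg_finder Logg_finder Logg_finder_alt
  have hA : (List.foldl loggStep (0, 0, []) star.toList).2.2 = gSpec 0 0 star.toList := by
    simpa using foldA star.toList 0 0 []
  rw [hA, splitOn_single '_' star.toList]
  have hg := g_eq_h star.toList 0 0 (by omega)
  rw [show ((4:Int) - 0).toNat = 4 from by omega] at hg
  by_cases hlen : (spChar '_' star.toList).length ≤ 4
  · simp only [if_pos hlen]
    rw [hg, List.getD_eq_default _ _ (by simpa using hlen), h_zero_join]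
    simp [spChar, PySem.Chars.join, List.intercalate]
  · simp only [if_neg hlen]
    rw [hg, h_zero_join, splitOn_single '.']
    have hpg : PySem.List.pyGet? (spChar '_' star.toList) 4 =
        (spChar '_' star.toList)[4]? := by
      rw [show ((4 : Int)) = ((4 : Nat) : Int) from rfl, PySem.List.pyGet?_natCast]
    rw [hpg]
    rw [show ((spChar '_' star.toList)[4]?).getD [] =
        (spChar '_' star.toList).getD 4 [] from by simp [List.getD]]
    rw [show PySem.List.slice (spChar '.' ((spChar '_' star.toList).getD 4 [])) none (some 2) =
        (spChar '.' ((spChar '_' star.toList).getD 4 [])).take 2 from by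
      rw [show ((2 : Int)) = ((2 : Nat) : Int) from rfl, PySem.List.slice_to_natCast]]
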